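-- pv_equiv track=rewrite | github.com/iamashank/Cyberoam-Login-Script | Cyberoam Login Script.py | encrypt_val
-- ===== SOURCE A (Python) =====
-- MASTER_KEY =  3464 # Must be a number less than 10000
--
-- def encrypt_val(input_text):
--     b = len(input_text)
--     input_text = input_text * MASTER_KEY
--     i = 0
--     box = [['a' for x in range(MASTER_KEY)] for y in range(b)]
--     for j in range(b):
--         for k in range(MASTER_KEY):
--             box[j][k] = input_text[i]
--             i+=1
--     output_text = ""
--     c = MASTER_KEY % 256
--     for k in range(MASTER_KEY):
--         for j in range(b):
--             output_text += chr((ord(box[j][k])+c)%256)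
--     return output_text
-- ===== SOURCE B (Python) =====
-- MASTER_KEY = 3464  # Must be a number less than 10000
--
-- def encrypt_val(input_text):
--     b = len(input_text)
--     c = MASTER_KEY % 256
--     out = []
--     for k in range(MASTER_KEY):
--         for j in range(b):
--             out.append(chr((ord(input_text[(j * MASTER_KEY + k) % b]) + c) % 256))
--     return ''.join(out)
-- ===== Notes on version B (the rewrite author's own statement) =====
-- stated objective: simpler
-- what changed: B drops the repeated-string construction and the intermediate 2D box matrix with its filling pass, emitting each output character directly from the input via the modular index (j*MASTER_KEY+k)%b in a single nested loop.
import Mathlib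
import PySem

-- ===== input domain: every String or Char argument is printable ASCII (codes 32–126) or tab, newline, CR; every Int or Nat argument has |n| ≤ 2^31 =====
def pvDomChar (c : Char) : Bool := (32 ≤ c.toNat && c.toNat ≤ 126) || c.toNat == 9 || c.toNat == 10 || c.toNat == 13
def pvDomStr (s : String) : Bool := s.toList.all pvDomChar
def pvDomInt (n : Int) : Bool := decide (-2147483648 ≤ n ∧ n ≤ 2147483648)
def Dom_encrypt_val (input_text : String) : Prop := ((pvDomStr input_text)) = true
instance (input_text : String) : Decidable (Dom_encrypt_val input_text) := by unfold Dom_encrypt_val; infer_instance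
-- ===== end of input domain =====

set_option maxRecDepth 8000
set_option maxHeartbeats 400000


-- B drops the repeated string and the intermediate 2D box matrix plus its filling pass,
-- emitting each output character directly via the modular index (j*MASTER_KEY+k) % b (objective: simpler).

-- ===== PORT A =====
-- the inner 'for k in range(MASTER_KEY)' filling loop of A (state: (box, i))
def pvAInner (rep : List Char) (j : Nat) (st : List (List Char) × Nat) : List (List Char) × Nat :=
  (List.range 3464).foldl (fun st2 k =>
    (st2.1.set j ((st2.1.getD j []).set k (rep.getD st2.2 'a')), st2.2 + 1)) st

def encrypt_val (input_text : String) : String :=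
  let l := input_text.toList
  let b := l.length
  let rep := PySem.List.pyRepeat l 3464          -- input_text = input_text * MASTER_KEY
  let box0 := (List.range b).map (fun _ => (List.range 3464).map (fun _ => 'a'))
  let st := (List.range b).foldl (fun st j => pvAInner rep j st) (box0, 0)
  let box := st.1
  let c := 3464 % 256
  let out := (List.range 3464).foldl (fun acc k =>
      (List.range b).foldl (fun acc2 j =>
        acc2 ++ [Char.ofNat ((((box.getD j []).getD k 'a').toNat + c) % 256)]) acc) []
  String.ofList out

-- ===== PORT B =====
def encrypt_val_alt (input_text : String) : String :=
  let l := input_text.toList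
  let b := l.length
  let c := 3464 % 256
  let out := (List.range 3464).foldl (fun acc k =>
      (List.range b).foldl (fun acc2 j =>
        acc2 ++ [Char.ofNat (((l.getD ((j * 3464 + k) % b) 'a').toNat + c) % 256)]) acc) []
  String.ofList out

-- ===== PRECONDITION & SPEC =====
def Spec_encrypt_val (input_text : String) (out : String) : Prop := out = encrypt_val_alt input_text
instance (input_text : String) (out : String) : Decidable (Spec_encrypt_val input_text out) := by unfold Spec_encrypt_val; infer_instance

-- ===== CLAIM (what is proved, stated in full; the proofs are below) =====
def Claim_equal_encrypt_val : Prop := ∀ (input_text : String), Dom_encrypt_val input_text → Spec_encrypt_val input_text (encrypt_val input_text)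

-- ===== LEMMAS AND PROOFS =====

-- filling a prefix of a row by successive `set`s
theorem pv_foldl_set_range (f : Nat → Char) :
    ∀ (K : Nat) (r : List Char), K ≤ r.length →
      (List.range K).foldl (fun r k => r.set k (f k)) r = (List.range K).map f ++ r.drop K := by
  intro K
  induction K with
  | zero => intro r _; simp
  | succ K ih =>
    intro r hK
    rw [List.range_succ, List.foldl_append, ih r (by omega)]
    simp only [List.foldl_cons, List.foldl_nil, List.set_append, List.length_map,
      List.length_range, lt_irrefl, if_false, Nat.sub_self]
    rw [List.drop_eq_getElem_cons (show K < r.length by omega), List.set_cons_zero,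
      List.map_append]
    simp

-- A's inner filling loop sets row j to the next 3464 characters of rep
theorem pv_inner_char (rep : List Char) (j : Nat) :
    ∀ (K : Nat) (box : List (List Char)) (i0 : Nat), j < box.length →
      (List.range K).foldl (fun st2 k =>
          (st2.1.set j ((st2.1.getD j []).set k (rep.getD st2.2 'a')), st2.2 + 1)) (box, i0)
      = (box.set j ((List.range K).foldl (fun r k => r.set k (rep.getD (i0 + k) 'a')) (box.getD j [])),
         i0 + K) := by
  intro K
  induction K with
  | zero =>
    intro box i0 h
    simp only [List.range_zero, List.foldl_nil, Prod.mk.injEq]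
    refine ⟨?_, rfl⟩
    have : box.getD j [] = box[j] := by simp [List.getD, List.getElem?_eq_getElem h]
    rw [this, List.set_getElem_self]
  | succ K ih =>
    intro box i0 h
    rw [List.range_succ, List.foldl_append, ih box i0 h, List.foldl_append]
    simp only [List.foldl_cons, List.foldl_nil, Prod.mk.injEq]
    constructor
    · have hget : (box.set j ((List.range K).foldl (fun r k => r.set k (rep.getD (i0 + k) 'a'))
          (box.getD j []))).getD j []
          = (List.range K).foldl (fun r k => r.set k (rep.getD (i0 + k) 'a')) (box.getD j []) := by
        simp [List.getD, List.getElem?_set_self (by simpa using h)]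
      rw [hget, List.set_set]
    · omega

def pvRow0 : List Char := (List.range 3464).map (fun _ => 'a')

def pvRowA (rep : List Char) (j : Nat) : List Char :=
  (List.range 3464).map (fun k => rep.getD (j * 3464 + k) 'a')

-- A's outer filling loop: after J rows, rows < J hold their final contents
theorem pv_outer_char (rep : List Char) (b : Nat) :
    ∀ (J : Nat), J ≤ b →
      (List.range J).foldl (fun st j => pvAInner rep j st)
          ((List.range b).map (fun _ => (List.range 3464).map (fun _ => 'a')), 0)
      = ((List.range b).map (fun j => if j < J then pvRowA rep j else pvRow0), J * 3464) := by
  intro J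
  induction J with
  | zero =>
    intro _
    simp only [List.range_zero, List.foldl_nil, Nat.zero_mul]
    exact congrArg (fun m => (m, 0))
      (List.map_congr_left (fun j _ => by rw [if_neg (Nat.not_lt_zero j)]; rfl))
  | succ J ih =>
    intro hJ
    rw [show List.range (J + 1) = List.range J ++ [J] from List.range_succ, List.foldl_append,
      ih (by omega)]
    simp only [List.foldl_cons, List.foldl_nil]
    unfold pvAInner
    rw [pv_inner_char rep J 3464 _ _ (by rw [List.length_map, List.length_range]; omega)]
    simp only [Prod.mk.injEq]
    constructor
    · rw [PySem.List.getD_map_range _ _ _ _ (by omega)]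
      simp only [show ¬ (J < J) from lt_irrefl J, if_false]
      have hfill : (List.range 3464).foldl (fun r k => r.set k (rep.getD (J * 3464 + k) 'a')) pvRow0
          = pvRowA rep J := by
        rw [pv_foldl_set_range _ 3464 pvRow0
          (by unfold pvRow0; rw [List.length_map, List.length_range])]
        rw [List.drop_eq_nil_of_le
          (by unfold pvRow0; rw [List.length_map, List.length_range]), List.append_nil]
        rfl
      rw [hfill]
      apply List.ext_getElem
      · rw [List.length_set, List.length_map, List.length_map]
      · intro i h1 h2
        simp only [List.getElem_set, List.getElem_map, List.getElem_range]
        by_cases hij : J = i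
        · subst hij; simp
        · simp only [hij, if_false]
          by_cases hlt : i < J
          · simp [hlt, show i < J + 1 by omega]
          · simp [hlt, show ¬ (i < J + 1) by omega]
    · ring

-- indexing into the 3464-fold repetition of l
theorem pv_getD_flatten_replicate (l : List Char) (d : Char) :
    ∀ (n m : Nat), m < n * l.length →
      ((List.replicate n l).flatten).getD m d = l.getD (m % l.length) d := by
  intro n
  induction n with
  | zero => intro m h; omega
  | succ n ih =>
    intro m h
    have hb : 0 < l.length := by
      by_contra hb
      have : l.length = 0 := by omega
      rw [this] at h; omega
    rw [List.replicate_succ, List.flatten_cons]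
    by_cases hm : m < l.length
    · rw [List.getD_append _ _ _ _ hm, Nat.mod_eq_of_lt hm]
    · have h1 : l.length ≤ m := by omega
      rw [List.getD_append_right _ _ _ _ h1, ih (m - l.length) (by
        have : (n + 1) * l.length = n * l.length + l.length := by ring
        omega)]
      congr 1
      rw [Nat.mod_eq_sub_mod h1]

-- the final box entry at (j, k)
theorem pv_box_entry (l : List Char) (j k : Nat) (hj : j < l.length) (hk : k < 3464) :
    ((((List.range l.length).map
        (fun j => if j < l.length then pvRowA (PySem.List.pyRepeat l 3464) j else pvRow0)).getD j []).getD k 'a')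
      = l.getD ((j * 3464 + k) % l.length) 'a' := by
  rw [PySem.List.getD_map_range _ _ _ _ hj]
  simp only [hj, if_true]
  unfold pvRowA
  rw [PySem.List.getD_map_range _ _ _ _ hk]
  unfold PySem.List.pyRepeat
  have : ((3464 : Int).toNat) = 3464 := by decide
  rw [this]
  exact pv_getD_flatten_replicate l 'a' 3464 (j * 3464 + k) (by nlinarith)

theorem pv_main (l : List Char) :
    (List.range 3464).foldl (fun acc k =>
        (List.range l.length).foldl (fun acc2 j =>
          acc2 ++ [Char.ofNat ((((((List.range l.length).foldl
              (fun st j => pvAInner (PySem.List.pyRepeat l 3464) j st)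
              ((List.range l.length).map (fun _ => (List.range 3464).map (fun _ => 'a')), 0)).1.getD j []).getD k 'a').toNat
            + 3464 % 256) % 256)]) acc) []
    = (List.range 3464).foldl (fun acc k =>
        (List.range l.length).foldl (fun acc2 j =>
          acc2 ++ [Char.ofNat (((l.getD ((j * 3464 + k) % l.length) 'a').toNat
            + 3464 % 256) % 256)]) acc) [] := by
  have hbox := congrArg Prod.fst
    (pv_outer_char (PySem.List.pyRepeat l 3464) l.length l.length le_rfl)
  simp only at hbox
  simp only [hbox]
  simp only [PySem.List.foldl_append_singleton_eq_map]
  rw [PySem.List.foldl_append_eq_flatMap, PySem.List.foldl_append_eq_flatMap,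
    List.nil_append, List.nil_append]
  apply List.flatMap_congr
  intro k hk
  apply List.map_congr_left
  intro j hj
  rw [List.mem_range] at hk hj
  rw [pv_box_entry l j k hj hk]

-- ===== VERDICT (by name: the statement is the Claim_ definition above) =====
theorem encrypt_val_spec : Claim_equal_encrypt_val := by
  intro input_text _
  unfold Spec_encrypt_val
  show encrypt_val input_text = encrypt_val_alt input_text
  unfold encrypt_val encrypt_val_alt
  exact congrArg String.ofList (pv_main input_text.toList)
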